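-- pv_equiv track=rewrite | github.com/Boostcamp-AI-Tech-1-15/algorithm_study | week_2/풍선 터트리기/hakyeom.py | solution
-- ===== SOURCE A (Python) =====
-- def solution(balloons):
--
--     answer = 0
--     # 왼쪽, 오른쪽의 최솟값(터지지 않는 풍선)을 기록하는 리스트를 만듬
--     left_min = balloons[0]
--     left_min_arr = [left_min]
--
--     for i in range(1, len(balloons)):
--         left_min = min(left_min, balloons[i])
--         left_min_arr.append(left_min)
--
--     right_min = balloons[len(balloons) - 1]
--     right_min_arr = [right_min]
--
--     for i in range(len(balloons) - 2, -1, -1):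
--         right_min = min(right_min, balloons[i])
--         right_min_arr.append(right_min)
--     right_min_arr = right_min_arr[::-1]
--
--     # 각각의 풍선이 터지지 않는 경우면 answer + 1
--     for i in range(len(balloons)):
--         mid = balloons[i]
--         if i == 0 or i == len(balloons) - 1:
--             answer += 1
--         elif not ((mid > left_min_arr[i - 1]) and (mid > right_min_arr[i + 1])):
--             answer += 1
--
--     return answer
-- ===== SOURCE B (Python) =====
-- def solution(balloons):
--     # A balloon survives iff it does NOT have a strictly smaller balloon on both
--     # sides; test that directly with existence scans over the two slices, with no
--     # precomputed minimum arrays.  (On the empty list this returns 0 where A raises.)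
--     count = 0
--     for i in range(len(balloons)):
--         x = balloons[i]
--         if not (any(b < x for b in balloons[:i]) and any(b < x for b in balloons[i + 1:])):
--             count += 1
--     return count
-- ===== Notes on version B (the rewrite author's own statement) =====
-- stated objective: alternative
-- what changed: B drops A's three passes building prefix/suffix running-minimum arrays and instead decides each balloon's survival directly by existence scans ('is there a strictly smaller balloon on each side?') over the two slices, trading O(n) with auxiliary arrays for an array-free O(n^2) brute force.
import Mathlib
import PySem

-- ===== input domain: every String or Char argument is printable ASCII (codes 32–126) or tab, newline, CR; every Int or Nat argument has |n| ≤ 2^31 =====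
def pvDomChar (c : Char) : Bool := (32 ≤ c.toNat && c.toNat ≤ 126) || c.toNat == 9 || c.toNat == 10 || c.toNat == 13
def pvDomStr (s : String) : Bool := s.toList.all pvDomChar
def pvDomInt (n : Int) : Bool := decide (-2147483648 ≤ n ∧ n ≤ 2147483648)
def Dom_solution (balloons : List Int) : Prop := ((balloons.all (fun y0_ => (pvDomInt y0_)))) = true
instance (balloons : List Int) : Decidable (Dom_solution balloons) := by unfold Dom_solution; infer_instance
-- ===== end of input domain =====

-- B replaces A's three passes over precomputed prefix/suffix running-minimum arrays by a direct
-- existence test per balloon ("a strictly smaller balloon on each side?") over the two slices: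
-- an array-free brute force (alternative decomposition; O(n^2) instead of A's O(n)).

-- ===== PORT A =====
-- literal transliteration of A; balloons[i] is ported with pyGetD, exact whenever the
-- index is in range, which Pre_solution (balloons ≠ []) guarantees at every access
def solution (balloons : List Int) : Int :=
  let answer : Int := 0
  let left_min : Int := PySem.List.pyGetD balloons 0 0
  let left_min_arr : List Int := [left_min]
  let fw := (PySem.List.pyRange 1 (balloons.length : Int) 1).foldl
    (fun (st : Int × List Int) i =>
      let m := min st.1 (PySem.List.pyGetD balloons i 0)
      (m, st.2 ++ [m])) (left_min, left_min_arr)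
  let right_min : Int := PySem.List.pyGetD balloons ((balloons.length : Int) - 1) 0
  let right_min_arr : List Int := [right_min]
  let bw := (PySem.List.pyRange ((balloons.length : Int) - 2) (-1) (-1)).foldl
    (fun (st : Int × List Int) i =>
      let m := min st.1 (PySem.List.pyGetD balloons i 0)
      (m, st.2 ++ [m])) (right_min, right_min_arr)
  let right_min_arr2 : List Int := (PySem.List.slice? bw.2 none none (-1)).getD []  -- [::-1]
  (PySem.List.pyRange 0 (balloons.length : Int) 1).foldl
    (fun acc i =>
      let mid := PySem.List.pyGetD balloons i 0
      if i = 0 ∨ i = (balloons.length : Int) - 1 then acc + 1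
      else if ¬ ((mid > PySem.List.pyGetD fw.2 (i - 1) 0) ∧
                 (mid > PySem.List.pyGetD right_min_arr2 (i + 1) 0)) then acc + 1
      else acc) answer

-- ===== PORT B =====
-- literal transliteration of Source B: for each i, 'any(b < x for b in balloons[:i])' and
-- 'any(... in balloons[i+1:])' are the two slice existence scans (slices clamp, so exact)
def solution_alt (balloons : List Int) : Int :=
  (PySem.List.pyRange 0 (balloons.length : Int) 1).foldl
    (fun (count : Int) i =>
      let x := PySem.List.pyGetD balloons i 0
      if ¬(((PySem.List.slice balloons none (some i)).any (fun b => decide (b < x))) = true ∧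
           ((PySem.List.slice balloons (some (i + 1)) none).any (fun b => decide (b < x))) = true)
      then count + 1 else count) 0

-- ===== PRECONDITION & SPEC =====
-- A raises IndexError on the empty list (balloons[0]); every other input is admitted.
def Pre_solution (balloons : List Int) : Prop := balloons ≠ []
instance (balloons : List Int) : Decidable (Pre_solution balloons) := by unfold Pre_solution; infer_instance
def pvWitness_solution : List Int := ([1, 2, 1, 3])

def Spec_solution (balloons : List Int) (out : Int) : Prop := out = solution_alt balloons
instance (balloons : List Int) (out : Int) : Decidable (Spec_solution balloons out) := by unfold Spec_solution; infer_instance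

-- ===== CLAIM (what is proved, stated in full; the proofs are below) =====
def Claim_equal_solution : Prop := ∀ (balloons : List Int), Dom_solution balloons → Pre_solution balloons → Spec_solution balloons (solution balloons)

-- ===== LEMMAS AND PROOFS =====

-- running-min value list: runs m l = [m, min m l0, min (min m l0) l1, …]
def runsTail (m : Int) : List Int → List Int
  | [] => []
  | x :: xs => min m x :: runsTail (min m x) xs

def runs (m : Int) (l : List Int) : List Int := m :: runsTail m l

@[simp] lemma runsTail_length (m : Int) (l : List Int) : (runsTail m l).length = l.length := by
  induction l generalizing m with
  | nil => rfl
  | cons x xs ih => simp [runsTail, ih]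

@[simp] lemma runs_length (m : Int) (l : List Int) : (runs m l).length = l.length + 1 := by
  simp [runs]

lemma runs_getD (l : List Int) (m : Int) (j : Nat) (hj : j ≤ l.length) :
    (runs m l).getD j 0 = (l.take j).foldl min m := by
  induction l generalizing m j with
  | nil =>
    have : j = 0 := by simpa using hj
    subst this; rfl
  | cons x xs ih =>
    cases j with
    | zero => rfl
    | succ j =>
      have h1 : (runs m (x :: xs)).getD (j + 1) 0 = (runs (min m x) xs).getD j 0 := rfl
      rw [h1, ih (min m x) j (by simpa using hj)]
      simp

-- fold-min is below x iff some participant is below x (order-independent)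
lemma foldl_min_lt (s : List Int) (m x : Int) :
    s.foldl min m < x ↔ m < x ∨ ∃ y ∈ s, y < x := by
  induction s generalizing m with
  | nil => simp
  | cons z zs ih =>
    simp only [List.foldl_cons, ih, min_lt_iff, List.mem_cons]
    constructor
    · rintro ((h | h) | ⟨y, hy, hyx⟩)
      · exact Or.inl h
      · exact Or.inr ⟨z, Or.inl rfl, h⟩
      · exact Or.inr ⟨y, Or.inr hy, hyx⟩
    · rintro (h | ⟨y, (rfl | hy), hyx⟩)
      · exact Or.inl (Or.inl h)
      · exact Or.inl (Or.inr hyx)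
      · exact Or.inr ⟨y, hy, hyx⟩

-- A's forward loop: running-min fold with appends over range(k, len) is runsTail of the drop
lemma lemA1 (xs : List Int) (k : Nat) (m : Int) (acc : List Int) (hk : k ≤ xs.length) :
    (PySem.List.pyRange (k : Int) (xs.length : Int) 1).foldl
      (fun (st : Int × List Int) i =>
        (min st.1 (PySem.List.pyGetD xs i 0), st.2 ++ [min st.1 (PySem.List.pyGetD xs i 0)])) (m, acc)
    = ((xs.drop k).foldl min m, acc ++ runsTail m (xs.drop k)) := by
  induction hd : xs.length - k generalizing k m acc with
  | zero =>
    have hk' : k = xs.length := by omega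
    subst hk'
    rw [PySem.List.pyRange_one_eq_nil (le_refl _)]
    simp [runsTail]
  | succ d ih =>
    have hklt : k < xs.length := by omega
    rw [PySem.List.pyRange_one_cons (by exact_mod_cast hklt)]
    simp only [List.foldl_cons]
    have hg : PySem.List.pyGetD xs (k : Int) 0 = xs[k] := by
      rw [PySem.List.pyGetD_natCast, List.getD_eq_getElem _ _ hklt]
    have hcast : ((k : Int) + 1) = ((k + 1 : Nat) : Int) := by push_cast; ring
    rw [hg, hcast, ih (k + 1) (min m xs[k]) (acc ++ [min m xs[k]]) (by omega) (by omega)]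
    have hdrop : xs.drop k = xs[k] :: xs.drop (k + 1) := List.drop_eq_getElem_cons hklt
    rw [hdrop]
    simp only [List.foldl_cons, runsTail, List.append_assoc, List.singleton_append]

-- A's backward loop: range(t-1, -1, -1) over xs is the forward loop on (take t).reverse
lemma lemB1 (xs : List Int) (t : Nat) (m : Int) (acc : List Int) (ht : t ≤ xs.length) :
    (PySem.List.pyRange ((t : Int) - 1) (-1) (-1)).foldl
      (fun (st : Int × List Int) i =>
        (min st.1 (PySem.List.pyGetD xs i 0), st.2 ++ [min st.1 (PySem.List.pyGetD xs i 0)])) (m, acc)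
    = (((xs.take t).reverse).foldl min m, acc ++ runsTail m ((xs.take t).reverse)) := by
  induction t generalizing m acc with
  | zero =>
    rw [show ((0 : Nat) : Int) - 1 = (-1 : Int) by norm_num,
        PySem.List.pyRange_neg_one_eq_nil (le_refl _)]
    simp [runsTail]
  | succ t ih =>
    have hcast : ((t + 1 : Nat) : Int) - 1 = (t : Int) := by push_cast; ring
    have htlt : t < xs.length := by omega
    rw [hcast, PySem.List.pyRange_neg_one_cons (by omega : (-1 : Int) < (t : Int))]
    simp only [List.foldl_cons]
    have hg : PySem.List.pyGetD xs (t : Int) 0 = xs[t] := by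
      rw [PySem.List.pyGetD_natCast, List.getD_eq_getElem _ _ htlt]
    rw [hg, ih (min m xs[t]) (acc ++ [min m xs[t]]) (by omega)]
    have htake : xs.take (t + 1) = xs.take t ++ [xs[t]] := by
      rw [List.take_add_one, List.getElem?_eq_getElem htlt]; rfl
    rw [htake, List.reverse_append]
    simp only [List.reverse_cons, List.reverse_nil, List.nil_append, List.singleton_append,
      List.foldl_cons, runsTail, List.append_assoc]

lemma reverse_getD {α : Type} (r : List α) (d : α) (k : Nat) (h : k < r.length) :
    r.reverse.getD k d = r.getD (r.length - 1 - k) d := by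
  rw [List.getD_eq_getElem _ _ (by simpa using h), List.getD_eq_getElem _ _ (by omega),
      List.getElem_reverse]

lemma merge_if (p q : Int → Prop) [DecidablePred p] [DecidablePred q] (idx : List Int) (init : Int) :
    idx.foldl (fun acc i => if p i then acc + 1 else if q i then acc + 1 else acc) init
    = init + (idx.countP (fun i => decide (p i ∨ q i)) : Int) := by
  rw [← PySem.List.foldl_ite_add_one (fun i => p i ∨ q i)]
  apply PySem.List.foldl_congr_mem
  intro acc x _
  by_cases h1 : p x
  · simp [h1]
  · by_cases h2 : q x <;> simp [h1, h2]

-- the per-index heart of the equivalence: A's survival test at index k (via the two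
-- running-min arrays) holds iff B's existence test on the two slices fails
lemma pointwise (a y : Int) (l qv : List Int) (k : Nat) (hk : k < l.length + 1)
    (hy : y = (a :: l).getD l.length 0) (hqv : qv = (a :: l).dropLast.reverse) :
    decide ((((k : Nat) : Int) = 0 ∨ ((k : Nat) : Int) = ((a :: l).length : Int) - 1) ∨
      ¬((a :: l).getD k 0 > PySem.List.pyGetD (runs a l) (((k : Nat) : Int) - 1) 0 ∧
        (a :: l).getD k 0 > ((runs y qv).reverse).getD (k + 1) 0))
    = decide (¬(((a :: l).take k).any (fun b => decide (b < (a :: l).getD k 0)) = true ∧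
        ((a :: l).drop (k + 1)).any (fun b => decide (b < (a :: l).getD k 0)) = true)) := by
  rw [decide_eq_decide]
  have hql : qv.length = l.length := by simp [hqv]
  by_cases h0 : k = 0
  · subst h0
    simp
  by_cases hlast : k = l.length
  · subst hlast
    have hdrop : (a :: l).drop (l.length + 1) = [] := List.drop_eq_nil_of_le (by simp)
    refine iff_of_true (Or.inl (Or.inr (by simp [List.length_cons]))) ?_
    rw [hdrop]
    simp
  -- interior index
  obtain ⟨k', rfl⟩ : ∃ k', k = k' + 1 := ⟨k - 1, by omega⟩
  have hkl : k' + 1 < l.length := by omega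
  have hlne : l ≠ [] := by intro h; subst h; simp at hkl
  have hc1 : ¬(((k' + 1 : Nat) : Int) = 0 ∨ ((k' + 1 : Nat) : Int) = ((a :: l).length : Int) - 1) := by
    simp [List.length_cons]
    omega
  have hM : (a :: l).getD (k' + 1) 0 = l.getD k' 0 := List.getD_cons_succ
  have hLidx : (((k' + 1 : Nat) : Int) - 1) = ((k' : Nat) : Int) := by push_cast; ring
  have hL : PySem.List.pyGetD (runs a l) (((k' + 1 : Nat) : Int) - 1) 0 = (l.take k').foldl min a := by
    rw [hLidx, PySem.List.pyGetD_natCast, runs_getD l a k' (by omega)]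
  have hR : ((runs y qv).reverse).getD (k' + 1 + 1) 0 = (qv.take (l.length - k' - 2)).foldl min y := by
    rw [reverse_getD _ _ _ (by simp [hql]; omega)]
    have h1 : (runs y qv).length - 1 - (k' + 1 + 1) = l.length - k' - 2 := by simp [hql]; omega
    rw [h1, runs_getD qv y _ (by omega)]
  -- y is the last element of l, so l splits as dropLast ++ [y]
  obtain ⟨m, hm⟩ : ∃ m, l.length = m + 1 := ⟨l.length - 1, by omega⟩
  have hy2 : y = l.getD m 0 := by rw [hy, hm]; exact List.getD_cons_succ
  have hsplitl : l.dropLast ++ [y] = l := by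
    have h1 := List.dropLast_concat_getLast hlne
    have h2 : l.getLast hlne = l.getD m 0 := by
      rw [List.getLast_eq_getElem, List.getD_eq_getElem _ _ (by omega)]
      congr 1
      omega
    rw [h2, ← hy2] at h1
    exact h1
  have hdle : l.dropLast.length = m := by simp [hm]
  have hdropcons : (a :: l).drop (k' + 1 + 1) = l.drop (k' + 1) := List.drop_succ_cons
  have hdl : l.drop (k' + 1) = l.dropLast.drop (k' + 1) ++ [y] := by
    conv_lhs => rw [← hsplitl]
    rw [List.drop_append_of_le_length (by rw [hdle]; omega)]
  have hq : qv = l.dropLast.reverse ++ [a] := by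
    rw [hqv, List.dropLast_cons_of_ne_nil hlne, List.reverse_cons]
  have hqtake : qv.take (l.length - k' - 2) = (l.dropLast.drop (k' + 1)).reverse := by
    rw [hq, List.take_append_of_le_length (by simp; omega), List.take_reverse,
        List.length_dropLast]
    congr 2
    omega
  have htakecons : (a :: l).take (k' + 1) = a :: l.take k' := List.take_succ_cons
  rw [hL, hR, hM, htakecons, hdropcons, hdl, hqtake]
  simp only [hc1, false_or, gt_iff_lt, foldl_min_lt, List.any_eq_true, decide_eq_true_eq,
    List.mem_cons, List.mem_append, List.mem_reverse, List.not_mem_nil, or_false]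
  constructor
  · rintro h ⟨⟨b, hb, hbx⟩, ⟨c, hc, hcx⟩⟩
    apply h
    refine ⟨?_, ?_⟩
    · rcases hb with rfl | hb
      · exact Or.inl hbx
      · exact Or.inr ⟨b, hb, hbx⟩
    · rcases hc with hc | rfl
      · exact Or.inr ⟨c, hc, hcx⟩
      · exact Or.inl hcx
  · rintro h ⟨hl1, hl2⟩
    apply h
    refine ⟨?_, ?_⟩
    · rcases hl1 with hax | ⟨b, hb, hbx⟩
      · exact ⟨a, Or.inl rfl, hax⟩
      · exact ⟨b, Or.inr hb, hbx⟩
    · rcases hl2 with hyx | ⟨c, hc, hcx⟩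
      · exact ⟨y, Or.inr rfl, hyx⟩
      · exact ⟨c, Or.inl hc, hcx⟩

theorem solution_spec_aux (a : Int) (l : List Int) :
    solution (a :: l) = solution_alt (a :: l) := by
  have h0 : PySem.List.pyGetD (a :: l) 0 0 = a := by simp [pysem]
  have hlastidx : (((a :: l).length : Int) - 1) = ((l.length : Nat) : Int) := by
    simp [List.length_cons]
  have hlast : PySem.List.pyGetD (a :: l) (((a :: l).length : Int) - 1) 0
      = (a :: l).getD l.length 0 := by
    rw [hlastidx, PySem.List.pyGetD_natCast]
  set y := (a :: l).getD l.length 0 with hy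
  set q := (a :: l).dropLast.reverse with hqdef
  have htk : (a :: l).take l.length = (a :: l).dropLast := by
    rw [List.dropLast_eq_take]; norm_num [List.length_cons]
  -- characterize A's two scans
  have hA1 := lemA1 (a :: l) 1 a [a] (by simp)
  simp only [Nat.cast_one, List.drop_one, List.tail_cons] at hA1
  have hB1 := lemB1 (a :: l) l.length y [y] (by simp)
  rw [htk] at hB1
  have hc2 : (((a :: l).length : Int) - 2) = ((l.length : Nat) : Int) - 1 := by
    simp [List.length_cons]; omega
  -- unfold both programs
  simp only [solution, solution_alt]
  rw [h0, hlast, hc2, hA1, hB1, ← hqdef,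
      show ([a] ++ runsTail a l) = runs a l from rfl,
      show ([y] ++ runsTail y q) = runs y q from rfl,
      PySem.List.slice?_none_none_neg_one, Option.getD_some,
      merge_if,
      PySem.List.foldl_ite_add_one
        (fun i => ¬(((PySem.List.slice (a :: l) none (some i)).any
            (fun b => decide (b < PySem.List.pyGetD (a :: l) i 0))) = true ∧
          ((PySem.List.slice (a :: l) (some (i + 1)) none).any
            (fun b => decide (b < PySem.List.pyGetD (a :: l) i 0))) = true)),
      PySem.List.pyRange_zero_natCast, List.countP_map, List.countP_map]
  simp only [zero_add, Nat.cast_inj]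
  apply List.countP_congr
  intro k hkmem
  have hk : k < l.length + 1 := by simpa using List.mem_range.mp hkmem
  simp only [Function.comp_apply, PySem.List.pyGetD_natCast, PySem.List.slice_to_natCast,
    show ∀ j : Nat, ((j : Nat) : Int) + 1 = ((j + 1 : Nat) : Int) from fun j => by push_cast; ring,
    PySem.List.slice_from_natCast]
  rw [pointwise a y l q k hk hy hqdef]

-- ===== VERDICT (by name: the statement is the Claim_ definition above) =====
theorem solution_spec : Claim_equal_solution := by
  intro balloons _ hpre
  unfold Spec_solution
  obtain ⟨a, l, rfl⟩ := List.exists_cons_of_ne_nil hpre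
  exact solution_spec_aux a l
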